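-- pv_equiv track=rewrite | github.com/riendril/chording-optimizer | src/token_generation/token_context.py | find_substring_relationships
-- ===== SOURCE A (Python) =====
-- from typing import Dict, List, Optional, Set, Tuple
--
-- def find_substring_relationships(
--     tokens: Dict[str, int],
-- ) -> Dict[str, Tuple[List[str], List[str]]]:
--     """
--     Find substring relationships between tokens.
--
--     Args:
--         tokens: Dictionary of tokens and their frequencies
--
--     Returns:
--         Dictionary mapping tokens to (is_substring_of, contains_substrings) lists
--     """
--     tokens_list = list(tokens.keys())
--     tokens_list.sort(key=len)  # Sort by length to find substrings efficiently
--
--     substring_relationships = {token: ([], []) for token in tokens_list}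
--
--     for i, shorter in enumerate(tokens_list):
--         if len(shorter) <= 1:
--             continue  # Skip single-character tokens
--
--         for longer in tokens_list[i + 1 :]:
--             if shorter in longer:
--                 # shorter is substring of longer
--                 substring_relationships[shorter][0].append(longer)
--                 # longer contains shorter
--                 substring_relationships[longer][1].append(shorter)
--
--     return substring_relationships
-- ===== SOURCE B (Python) =====
-- def find_substring_relationships(tokens):
--     """Same result as A, but instead of testing every token pair with 'in'
--     (O(n^2) substring scans), enumerate each token's own substrings once,
--     look them up in a hash index, and order the hits by token index."""
--     order = sorted(tokens.keys(), key=len)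
--     index = {t: i for i, t in enumerate(order)}
--     result = {t: ([], []) for t in order}
--     for t in order:
--         n = len(t)
--         found = set()
--         for length in range(2, n):
--             for start in range(n - length + 1):
--                 sub = t[start:start + length]
--                 if sub in index:
--                     found.add(sub)
--         for s in sorted(found, key=lambda s: index[s]):
--             result[t][1].append(s)
--             result[s][0].append(t)
--     return result
-- ===== Notes on version B (the rewrite author's own statement) =====
-- stated objective: faster
-- what changed: Instead of testing every token pair with Python's substring scan ('shorter in longer') in a nested O(n^2) double loop, B enumerates each token's own substrings of length 2..len-1 once, looks each up in a hash index of all tokens, and appends the hits ordered by token index.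
import Mathlib
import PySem

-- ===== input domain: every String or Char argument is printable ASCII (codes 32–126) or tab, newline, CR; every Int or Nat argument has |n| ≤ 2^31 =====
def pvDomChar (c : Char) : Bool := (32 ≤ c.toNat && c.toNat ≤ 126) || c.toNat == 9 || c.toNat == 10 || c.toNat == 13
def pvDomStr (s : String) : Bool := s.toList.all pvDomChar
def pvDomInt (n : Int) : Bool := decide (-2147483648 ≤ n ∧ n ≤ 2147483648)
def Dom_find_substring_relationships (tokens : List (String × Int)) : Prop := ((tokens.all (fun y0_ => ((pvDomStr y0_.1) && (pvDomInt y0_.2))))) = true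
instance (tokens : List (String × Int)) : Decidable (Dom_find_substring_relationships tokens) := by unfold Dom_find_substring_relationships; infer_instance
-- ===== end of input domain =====

-- One-line summary: B replaces A's pairwise `shorter in longer` double loop by
-- enumerating each token's substrings once and looking them up in a hash index,
-- re-ordering hits by token index (objective: faster).

-- ===== PORT A =====
-- Python A: sort dict keys by length, init {t: ([],[])}, then for each (i, shorter)
-- with len > 1, scan tokens_list[i+1:] and append on `shorter in longer`.
def find_substring_relationships (tokens : List (String × Int)) : List (String × List String × List String) :=
  let tokens_list := PySem.List.sorted (PySem.List.dedup (tokens.map (fun p => p.1))) (fun t => PySem.Str.len t)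
  let subrel0 : PySem.Dict String (List String × List String) :=
    tokens_list.foldl (fun d t => d.insert t ([], [])) PySem.Dict.empty
  let subrel :=
    (PySem.List.enumerate tokens_list).foldl (fun d p =>
      if PySem.Str.len p.2 ≤ 1 then d
      else
        (PySem.List.slice tokens_list (some (p.1 + 1)) none).foldl (fun d longer =>
          if PySem.Str.isIn p.2 longer then
            (d.modify p.2 ([], []) (fun q => (q.1 ++ [longer], q.2))).modify longer ([], [])
              (fun q => (q.1, q.2 ++ [p.2]))
          else d) d) subrel0
  subrel.items

-- ===== PORT B =====
-- Python B: sort keys by length, build index {token: position}, then for each token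
-- enumerate its substrings of length 2..len-1, collect the ones that are tokens in a
-- set, and append them (ordered by token index) to the two relationship lists.
def find_substring_relationships_alt (tokens : List (String × Int)) : List (String × List String × List String) :=
  let order := PySem.List.sorted (PySem.List.dedup (tokens.map (fun p => p.1))) (fun t => PySem.Str.len t)
  let index : PySem.Dict String Int :=
    (PySem.List.enumerate order).foldl (fun d p => d.insert p.2 p.1) PySem.Dict.empty
  let result0 : PySem.Dict String (List String × List String) :=
    order.foldl (fun d t => d.insert t ([], [])) PySem.Dict.empty
  let result :=
    order.foldl (fun d t =>
      let n := PySem.Str.len t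
      let found : PySem.Set String :=
        (PySem.List.pyRange 2 n).foldl (fun f length =>
          (PySem.List.pyRange 0 (n - length + 1)).foldl (fun f start =>
            if index.contains (PySem.Str.slice t (some start) (some (start + length))) then
              f.add (PySem.Str.slice t (some start) (some (start + length)))
            else f) f) PySem.Set.empty
      -- `sorted(found, key=lambda s: index[s])`: every s ∈ found is a key of index,
      -- so Python's index[s] is ported as index.getD s 0
      (PySem.List.sorted found (fun s => index.getD s 0)).foldl (fun d s =>
        (d.modify t ([], []) (fun q => (q.1, q.2 ++ [s]))).modify s ([], [])
          (fun q => (q.1 ++ [t], q.2))) d) result0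
  result.items

-- ===== PRECONDITION & SPEC =====
def Spec_find_substring_relationships (tokens : List (String × Int)) (out : List (String × List String × List String)) : Prop := out = find_substring_relationships_alt tokens
instance (tokens : List (String × Int)) (out : List (String × List String × List String)) : Decidable (Spec_find_substring_relationships tokens out) := by unfold Spec_find_substring_relationships; infer_instance

-- ===== CLAIM (what is proved, stated in full; the proofs are below) =====
def Claim_equal_find_substring_relationships : Prop := ∀ (tokens : List (String × Int)), Dom_find_substring_relationships tokens → Spec_find_substring_relationships tokens (find_substring_relationships tokens)

-- ===== LEMMAS AND PROOFS =====

-- Abbreviations for the two ports' shared pieces (proof-side only)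
def pvV0 : List String × List String := ([], [])

def pvOrder (tokens : List (String × Int)) : List String :=
  PySem.List.sorted (PySem.List.dedup (tokens.map (fun p => p.1))) (fun t => PySem.Str.len t)

def pvInit (L : List String) : PySem.Dict String (List String × List String) :=
  L.foldl (fun d t => d.insert t ([], [])) PySem.Dict.empty

-- A's inner-loop step and the structural form of A's double loop
def pvStepA (s : String) (d : PySem.Dict String (List String × List String)) (u : String) :
    PySem.Dict String (List String × List String) :=
  if PySem.Str.isIn s u then
    (d.modify s ([], []) (fun q => (q.1 ++ [u], q.2))).modify u ([], []) (fun q => (q.1, q.2 ++ [s]))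
  else d

def pvPairFold : List String → PySem.Dict String (List String × List String) →
    PySem.Dict String (List String × List String)
  | [], d => d
  | s :: rest, d =>
      pvPairFold rest (if PySem.Str.len s ≤ 1 then d else rest.foldl (pvStepA s) d)

-- B's pieces
def pvIndex (L : List String) : PySem.Dict String Int :=
  (PySem.List.enumerate L).foldl (fun d p => d.insert p.2 p.1) PySem.Dict.empty

def pvFound (L : List String) (t : String) : PySem.Set String :=
  (PySem.List.pyRange 2 (PySem.Str.len t)).foldl (fun f length =>
    (PySem.List.pyRange 0 (PySem.Str.len t - length + 1)).foldl (fun f start =>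
      if (pvIndex L).contains (PySem.Str.slice t (some start) (some (start + length))) then
        f.add (PySem.Str.slice t (some start) (some (start + length)))
      else f) f) PySem.Set.empty

def pvCs (L : List String) (t : String) : List String :=
  PySem.List.sorted (pvFound L t) (fun s => (pvIndex L).getD s 0)

def pvStepB (t : String) (d : PySem.Dict String (List String × List String)) (s : String) :
    PySem.Dict String (List String × List String) :=
  (d.modify t ([], []) (fun q => (q.1, q.2 ++ [s]))).modify s ([], []) (fun q => (q.1 ++ [t], q.2))

-- Reference values: after processing the prefix `pre` of `L`, key `c` holds (pvA0 L pre c, pvA1 L pre c) in A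
def pvAfter (L : List String) (s : String) : List String := L.drop (L.idxOf s + 1)

def pvA0 (L pre : List String) (c : String) : List String :=
  if c ∈ pre ∧ 1 < PySem.Str.len c then (pvAfter L c).filter (fun u => PySem.Str.isIn c u) else []

def pvA1 (L pre : List String) (c : String) : List String :=
  pre.filter (fun s => decide (1 < PySem.Str.len s) && PySem.Str.isIn s c &&
    decide (c ∈ pvAfter L s))

-- ---------- Dict plumbing ----------
theorem pv_keys_modify_mem {ν : Type} (d : PySem.Dict String ν) (k : String) (d0 : ν) (f : ν → ν)
    (h : k ∈ d.keys) : (d.modify k d0 f).keys = d.keys := by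
  rw [PySem.Dict.keys_modify]
  exact PySem.Dict.keys_insert_of_contains d _ ((PySem.Dict.contains_iff_mem_keys d k).mpr h)

theorem pv_items_eq_keys_map (d : PySem.Dict String (List String × List String))
    (h : d.keys.Nodup) : d.items = d.keys.map (fun k => (k, d.getD k pvV0)) := by
  have hk : d.keys = d.items.map (fun p => p.1) := by simp [PySem.Dict.keys]
  rw [hk, List.map_map]
  conv_lhs => rw [show d.items = d.items.map id from (List.map_id _).symm]
  apply List.map_congr_left
  intro p hp
  have : d.getD p.1 pvV0 = p.2 := PySem.Dict.getD_of_mem_items d (by exact hp) h pvV0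
  simp [Function.comp, this]

theorem pvInit_keys (L : List String) (hN : L.Nodup) : (pvInit L).keys = L := by
  unfold pvInit
  rw [PySem.Dict.keys_foldl_insert, PySem.Dict.keys_empty]
  exact PySem.Set.ofList_eq_self_of_nodup L hN

theorem pvInit_getD (L : List String) (hN : L.Nodup) (c : String) :
    (pvInit L).getD c pvV0 = pvV0 := by
  by_cases hc : c ∈ L
  · have hitems : (pvInit L).items = [] ++ L.map (fun t => (t, (([],[]) : List String × List String))) := by
      unfold pvInit
      exact PySem.Dict.items_foldl_insert_fresh L (fun t => t) (fun _ => ([], [])) PySem.Dict.empty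
        (by intro a _; exact PySem.Dict.contains_empty a) (by simpa using hN)
    have hmem : (c, (([],[]) : List String × List String)) ∈ (pvInit L).items := by
      rw [hitems]; simp [hc]
    have hkeys : (pvInit L).keys.Nodup := by rw [pvInit_keys L hN]; exact hN
    simpa [pvV0] using PySem.Dict.getD_of_mem_items _ hmem hkeys pvV0
  · apply PySem.Dict.getD_of_not_contains
    rw [PySem.Dict.contains_eq_decide_mem_keys, pvInit_keys L hN]
    simpa using hc

-- ---------- index dict ----------
theorem pv_enum_insert_get? (xs : List String) : ∀ (k : Int) (d : PySem.Dict String Int)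
    (c : String), xs.Nodup →
    ((PySem.List.enumerate xs k).foldl (fun d p => d.insert p.2 p.1) d).get? c =
      if c ∈ xs then some (k + (xs.idxOf c : Int)) else d.get? c := by
  induction xs with
  | nil => intro k d c _; simp [PySem.List.enumerate]
  | cons x rest ih =>
    intro k d c hnd
    rw [PySem.List.enumerate_cons]
    simp only [List.foldl_cons]
    rw [ih (k+1) _ c hnd.of_cons]
    by_cases hcx : c = x
    · subst hcx
      have : c ∉ rest := by simpa using (List.nodup_cons.mp hnd).1
      simp [this]
    · by_cases hcr : c ∈ rest
      · rw [if_pos hcr, if_pos (by simp [hcr] : c ∈ x :: rest)]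
        congr 1
        rw [List.idxOf_cons]
        rw [show (x == c) = false by simp [Ne.symm hcx]]
        simp only [cond_false]
        push_cast
        ring
      · simp [hcr, hcx, PySem.Dict.get?_insert]

theorem pvIndex_contains (L : List String) (hN : L.Nodup) (c : String) :
    (pvIndex L).contains c = decide (c ∈ L) := by
  rw [PySem.Dict.contains_eq_isSome_get?]
  unfold pvIndex
  rw [pv_enum_insert_get? L 0 _ c hN]
  by_cases h : c ∈ L <;> simp [h, PySem.Dict.get?_empty]

theorem pvIndex_getD (L : List String) (hN : L.Nodup) (c : String) (hc : c ∈ L) :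
    (pvIndex L).getD c 0 = (L.idxOf c : Int) := by
  rw [PySem.Dict.getD_eq_get?_getD]
  unfold pvIndex
  rw [pv_enum_insert_get? L 0 _ c hN]
  simp [hc]

-- ---------- generic set-accumulation folds ----------
theorem pv_foldl_accum_mem {α : Type} (F : PySem.Set String → α → PySem.Set String)
    (Q : α → String → Prop) (hF : ∀ f a x, x ∈ F f a ↔ x ∈ f ∨ Q a x) :
    ∀ (l : List α) (f0 : PySem.Set String) (x : String),
      x ∈ l.foldl F f0 ↔ x ∈ f0 ∨ ∃ a ∈ l, Q a x := by
  intro l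
  induction l with
  | nil => simp
  | cons a rest ih =>
    intro f0 x
    simp only [List.foldl_cons, ih, hF]
    constructor
    · rintro ((h | h) | ⟨b, hb, hQ⟩)
      · exact Or.inl h
      · exact Or.inr ⟨a, List.mem_cons_self, h⟩
      · exact Or.inr ⟨b, List.mem_cons_of_mem a hb, hQ⟩
    · rintro (h | ⟨b, hb, hQ⟩)
      · exact Or.inl (Or.inl h)
      · rcases List.mem_cons.mp hb with rfl | hb
        · exact Or.inl (Or.inr hQ)
        · exact Or.inr ⟨b, hb, hQ⟩

theorem pv_foldl_accum_nodup {α : Type} (F : PySem.Set String → α → PySem.Set String)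
    (hF : ∀ f a, f.Nodup → (F f a).Nodup) :
    ∀ (l : List α) (f0 : PySem.Set String), f0.Nodup → (l.foldl F f0).Nodup := by
  intro l
  induction l with
  | nil => intro f0 h; simpa using h
  | cons a rest ih => intro f0 h; simpa using ih _ (hF f0 a h)

-- ---------- substring enumeration = infix ----------
theorem pv_slice_exists_iff (t x : String) :
    (∃ l ∈ PySem.List.pyRange 2 (PySem.Str.len t),
      ∃ st ∈ PySem.List.pyRange 0 (PySem.Str.len t - l + 1),
        PySem.Str.slice t (some st) (some (st + l)) = x)
    ↔ (2 ≤ x.toList.length ∧ x.toList.length < t.toList.length ∧ x.toList <:+: t.toList) := by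
  have hlen : PySem.Str.len t = (t.toList.length : Int) := PySem.Str.len_eq t
  constructor
  · rintro ⟨l, hl, st, hst, rfl⟩
    rw [PySem.List.mem_pyRange_one, hlen] at hl
    rw [PySem.List.mem_pyRange_one, hlen] at hst
    obtain ⟨hl2, hln⟩ := hl
    obtain ⟨hst0, hstn⟩ := hst
    have hm : l = ((l.toNat : Nat) : Int) := by omega
    have ha : st = ((st.toNat : Nat) : Int) := by omega
    set m := l.toNat with hmdef
    set a := st.toNat with hadef
    have ham : a + m ≤ t.toList.length := by omega
    have hxl : (PySem.Str.slice t (some st) (some (st + l))).toList =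
        (t.toList.drop a).take m := by
      rw [PySem.Str.toList_slice, PySem.Chars.slice_eq_listSlice, hm, ha]
      exact PySem.List.slice_natCast_add t.toList a m
    have hxlen : ((t.toList.drop a).take m).length = m := by
      rw [List.length_take, List.length_drop]
      omega
    refine ⟨?_, ?_, ?_⟩
    · rw [hxl, hxlen]; omega
    · rw [hxl, hxlen]; omega
    · rw [hxl]
      refine ⟨t.toList.take a, (t.toList.drop a).drop m, ?_⟩
      rw [List.append_assoc, List.take_append_drop, List.take_append_drop]
  · rintro ⟨hx2, hxn, hinf⟩
    have hIn : PySem.Chars.isIn x.toList t.toList = true :=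
      (PySem.Chars.isIn_iff_infix _ _).mpr hinf
    obtain ⟨j, hpre⟩ := (PySem.Chars.exists_prefix_drop_iff_isIn x.toList t.toList).mpr hIn
    set m := x.toList.length with hmdef
    set n := t.toList.length with hndef
    have hjm : m ≤ n - j := by
      have := hpre.length_le
      simpa [List.length_drop] using this
    have hjn : j ≤ n - m := by omega
    have hxeq : x.toList = (t.toList.drop j).take m := List.prefix_iff_eq_take.mp hpre
    refine ⟨(m : Int), ?_, (j : Int), ?_, ?_⟩
    · rw [PySem.List.mem_pyRange_one, hlen]
      constructor <;> [exact_mod_cast hx2; exact_mod_cast hxn]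
    · rw [PySem.List.mem_pyRange_one, hlen]
      constructor
      · positivity
      · have hmn : m ≤ n := by omega
        have : (j:Int) ≤ (n:Int) - (m:Int) := by
          have : ((j:Int)) ≤ ((n - m : Nat) : Int) := by exact_mod_cast hjn
          omega
        omega
    · apply String.ext
      rw [PySem.Str.toList_slice, PySem.Chars.slice_eq_listSlice,
        PySem.List.slice_natCast_add t.toList j m, hxeq]

theorem pv_mem_pvFound (L : List String) (hN : L.Nodup) (t x : String) :
    x ∈ pvFound L t ↔ x ∈ L ∧ 2 ≤ x.toList.length ∧ x.toList.length < t.toList.length ∧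
      x.toList <:+: t.toList := by
  unfold pvFound
  have hmem := pv_foldl_accum_mem
    (fun f length => (PySem.List.pyRange 0 (PySem.Str.len t - length + 1)).foldl (fun f start =>
      if (pvIndex L).contains (PySem.Str.slice t (some start) (some (start + length))) then
        f.add (PySem.Str.slice t (some start) (some (start + length)))
      else f) f)
    (fun l x => ∃ st ∈ PySem.List.pyRange 0 (PySem.Str.len t - l + 1),
      PySem.Str.slice t (some st) (some (st + l)) = x ∧ (pvIndex L).contains x = true)
    (by
      intro f l x
      exact pv_foldl_accum_mem
        (fun f start =>
          if (pvIndex L).contains (PySem.Str.slice t (some start) (some (start + l))) then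
            f.add (PySem.Str.slice t (some start) (some (start + l)))
          else f)
        (fun st x => PySem.Str.slice t (some st) (some (st + l)) = x ∧
          (pvIndex L).contains x = true)
        (by
          intro f st x
          by_cases hc : (pvIndex L).contains (PySem.Str.slice t (some st) (some (st + l))) = true
          · simp only [if_pos hc, PySem.Set.mem_add]
            constructor
            · rintro (h | rfl)
              · exact Or.inl h
              · exact Or.inr ⟨rfl, hc⟩
            · rintro (h | ⟨rfl, _⟩)
              · exact Or.inl h
              · exact Or.inr rfl
          · simp only [if_neg hc]
            constructor
            · exact Or.inl
            · rintro (h | ⟨rfl, hcx⟩)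
              · exact h
              · exact absurd hcx hc)
        (PySem.List.pyRange 0 (PySem.Str.len t - l + 1)) f x)
    (PySem.List.pyRange 2 (PySem.Str.len t)) PySem.Set.empty x
  rw [hmem]
  have hempty : x ∉ (PySem.Set.empty : PySem.Set String) := by simp [PySem.Set.empty]
  rw [pvIndex_contains L hN x]
  constructor
  · rintro (h | ⟨l, hl, st, hst, heq, hcx⟩)
    · exact absurd h hempty
    · have := pv_slice_exists_iff t x |>.mp ⟨l, hl, st, hst, heq⟩
      exact ⟨by simpa using hcx, this⟩
  · rintro ⟨hxL, h2, hn, hinf⟩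
    obtain ⟨l, hl, st, hst, heq⟩ := (pv_slice_exists_iff t x).mpr ⟨h2, hn, hinf⟩
    exact Or.inr ⟨l, hl, st, hst, heq, by simpa using hxL⟩

theorem pv_pvFound_nodup (L : List String) (t : String) : (pvFound L t).Nodup := by
  unfold pvFound
  apply pv_foldl_accum_nodup
  · intro f l hf
    apply pv_foldl_accum_nodup
    · intro f st hf
      split
      · exact PySem.Set.nodup_add _ _ hf
      · exact hf
    · exact hf
  · exact List.nodup_nil

-- ---------- positions in L ----------
theorem pv_mem_after_iff (L : List String) (hN : L.Nodup) (s : String) (hs : s ∈ L)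
    (t : String) : t ∈ pvAfter L s ↔ t ∈ L ∧ L.idxOf s < L.idxOf t := by
  unfold pvAfter
  constructor
  · intro h
    obtain ⟨j, hj, rfl⟩ := List.getElem_of_mem h
    rw [List.getElem_drop] at *
    have hlen : L.idxOf s + 1 + j < L.length := by
      have := List.length_drop (l := L) (i := L.idxOf s + 1) ▸ hj
      omega
    refine ⟨List.getElem_mem _, ?_⟩
    rw [List.Nodup.idxOf_getElem hN _ _]
    omega
  · rintro ⟨ht, hlt⟩
    have hi : L.idxOf t < L.length := List.idxOf_lt_length_of_mem ht
    have : L.drop (L.idxOf s + 1) = L.drop (L.idxOf s + 1) := rfl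
    have hget : (L.drop (L.idxOf s + 1))[L.idxOf t - (L.idxOf s + 1)]'(by
        rw [List.length_drop]; omega) = t := by
      rw [List.getElem_drop]
      have harith : L.idxOf s + 1 + (L.idxOf t - (L.idxOf s + 1)) = L.idxOf t := by omega
      simp only [harith]
      exact List.getElem_idxOf hi
    exact hget ▸ List.getElem_mem _

theorem pv_idx_len_mono (L : List String)
    (hP : L.Pairwise (fun a b => PySem.Str.len a ≤ PySem.Str.len b))
    (s t : String) (hs : s ∈ L) (ht : t ∈ L) (h : L.idxOf s ≤ L.idxOf t) :
    PySem.Str.len s ≤ PySem.Str.len t := by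
  rcases Nat.lt_or_ge (L.idxOf s) (L.idxOf t) with hlt | hge
  · have hj : L.idxOf t < L.length := List.idxOf_lt_length_of_mem ht
    have := (List.pairwise_iff_getElem.mp hP) (L.idxOf s) (L.idxOf t)
      (List.idxOf_lt_length_of_mem hs) hj hlt
    rwa [List.getElem_idxOf, List.getElem_idxOf] at this
  · have : L.idxOf s = L.idxOf t := by omega
    have heq : s = t := by
      have h1 : L[L.idxOf s]'(List.idxOf_lt_length_of_mem hs) = s := List.getElem_idxOf _
      have h2 : L[L.idxOf t]'(List.idxOf_lt_length_of_mem ht) = t := List.getElem_idxOf _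
      rw [← h1, ← h2]
      congr 1
    rw [heq]

theorem pv_pairwise_idx (L : List String) (hN : L.Nodup) :
    L.Pairwise (fun a b => L.idxOf a < L.idxOf b) := by
  rw [List.pairwise_iff_getElem]
  intro i j hi hj hij
  rw [List.Nodup.idxOf_getElem hN i hi, List.Nodup.idxOf_getElem hN j hj]
  exact hij

-- key fact: for tokens in L, "x is a proper substring of t (and a token)" matches
-- "x comes before t in L, has length > 1 and x in t"
theorem pv_len_lt_iff (L : List String) (hN : L.Nodup)
    (hP : L.Pairwise (fun a b => PySem.Str.len a ≤ PySem.Str.len b))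
    (x t : String) (hx : x ∈ L) (ht : t ∈ L) (hinf : x.toList <:+: t.toList) :
    L.idxOf x < L.idxOf t ↔ x.toList.length < t.toList.length := by
  have hlx := PySem.Str.len_eq x
  have hlt := PySem.Str.len_eq t
  constructor
  · intro h
    have hle : PySem.Str.len x ≤ PySem.Str.len t :=
      pv_idx_len_mono L hP x t hx ht (Nat.le_of_lt h)
    have hle' : x.toList.length ≤ t.toList.length := by omega
    rcases Nat.lt_or_ge x.toList.length t.toList.length with h' | h'
    · exact h'
    · exfalso
      have : x.toList = t.toList := hinf.eq_of_length (by omega)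
      have : x = t := String.toList_inj.mp this
      subst this
      omega
  · intro h
    rcases Nat.lt_or_ge (L.idxOf x) (L.idxOf t) with h' | h'
    · exact h'
    · exfalso
      have hle : PySem.Str.len t ≤ PySem.Str.len x :=
        pv_idx_len_mono L hP t x ht hx h'
      omega

theorem pv_mem_pvA1_iff (L : List String) (hN : L.Nodup)
    (hP : L.Pairwise (fun a b => PySem.Str.len a ≤ PySem.Str.len b))
    (t : String) (ht : t ∈ L) (x : String) :
    x ∈ pvA1 L L t ↔ (x ∈ L ∧ 2 ≤ x.toList.length ∧ x.toList.length < t.toList.length ∧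
      x.toList <:+: t.toList) := by
  unfold pvA1
  rw [List.mem_filter]
  constructor
  · rintro ⟨hxL, hpred⟩
    simp only [Bool.and_eq_true, decide_eq_true_eq] at hpred
    obtain ⟨⟨hlen, hisin⟩, hafter⟩ := hpred
    have hinf : x.toList <:+: t.toList := (PySem.Str.isIn_iff_infix x t).mp hisin
    have h2 : 2 ≤ x.toList.length := by
      have := PySem.Str.len_eq x; omega
    obtain ⟨htL, hidx⟩ := (pv_mem_after_iff L hN x hxL t).mp hafter
    exact ⟨hxL, h2, (pv_len_lt_iff L hN hP x t hxL ht hinf).mp hidx, hinf⟩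
  · rintro ⟨hxL, h2, hlt, hinf⟩
    refine ⟨hxL, ?_⟩
    simp only [Bool.and_eq_true, decide_eq_true_eq]
    refine ⟨⟨by have := PySem.Str.len_eq x; omega, (PySem.Str.isIn_iff_infix x t).mpr hinf⟩, ?_⟩
    exact (pv_mem_after_iff L hN x hxL t).mpr
      ⟨ht, (pv_len_lt_iff L hN hP x t hxL ht hinf).mpr hlt⟩

theorem pv_pvCs_eq_pvA1 (L : List String) (hN : L.Nodup)
    (hP : L.Pairwise (fun a b => PySem.Str.len a ≤ PySem.Str.len b))
    (t : String) (ht : t ∈ L) : pvCs L t = pvA1 L L t := by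
  unfold pvCs
  apply PySem.List.sorted_eq_of_perm_of_pairwise_lt
  · have hnd : (pvA1 L L t).Nodup := by unfold pvA1; exact hN.filter _
    rw [List.perm_ext_iff_of_nodup hnd (pv_pvFound_nodup L t)]
    intro a
    rw [pv_mem_pvFound L hN t a]
    exact pv_mem_pvA1_iff L hN hP t ht a
  · have hsub : (pvA1 L L t).Sublist L := by unfold pvA1; exact List.filter_sublist
    have hpw : (pvA1 L L t).Pairwise (fun a b => L.idxOf a < L.idxOf b) :=
      List.Pairwise.sublist hsub (pv_pairwise_idx L hN)
    apply hpw.imp_of_mem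
    intro a b ha hb hab
    have haL : a ∈ L := List.mem_of_mem_filter ha
    have hbL : b ∈ L := List.mem_of_mem_filter hb
    rw [pvIndex_getD L hN a haL, pvIndex_getD L hN b hbL]
    exact_mod_cast hab

theorem pv_filter_pvCs_eq_pvA0 (L : List String) (hN : L.Nodup)
    (hP : L.Pairwise (fun a b => PySem.Str.len a ≤ PySem.Str.len b))
    (c : String) (hc : c ∈ L) :
    L.filter (fun u => decide (c ∈ pvCs L u)) = pvA0 L L c := by
  have hmem : ∀ u ∈ L, (c ∈ pvCs L u ↔
      (c ∈ L ∧ 2 ≤ c.toList.length ∧ c.toList.length < u.toList.length ∧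
        c.toList <:+: u.toList)) := by
    intro u hu
    rw [pv_pvCs_eq_pvA1 L hN hP u hu]
    exact pv_mem_pvA1_iff L hN hP u hu c
  unfold pvA0
  by_cases h1 : 1 < PySem.Str.len c
  · have h2 : 2 ≤ c.toList.length := by have := PySem.Str.len_eq c; omega
    rw [if_pos ⟨hc, h1⟩]
    have hsplit : ∀ (p : String → Bool), L.filter p =
        (L.take (L.idxOf c + 1)).filter p ++ (L.drop (L.idxOf c + 1)).filter p := by
      intro p
      conv_lhs => rw [← List.take_append_drop (L.idxOf c + 1) L]
      rw [List.filter_append]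
    rw [hsplit]
    have hfirst : (L.take (L.idxOf c + 1)).filter (fun u => decide (c ∈ pvCs L u)) = [] := by
      rw [List.filter_eq_nil_iff]
      intro u hu
      simp only [decide_eq_true_eq]
      intro hmem'
      have huL : u ∈ L := List.mem_of_mem_take hu
      obtain ⟨_, _, hlt, hinf⟩ := (hmem u huL).mp hmem'
      have hidx : L.idxOf u ≤ L.idxOf c := by
        obtain ⟨i, hi, rfl⟩ := List.getElem_of_mem hu
        rw [List.getElem_take] at *
        have hiL : i < L.length := by rw [List.length_take] at hi; omega
        rw [hN.idxOf_getElem i hiL]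
        rw [List.length_take] at hi
        omega
      have := (pv_len_lt_iff L hN hP c u hc huL hinf).mpr hlt
      omega
    rw [hfirst, List.nil_append]
    have : pvAfter L c = L.drop (L.idxOf c + 1) := rfl
    rw [← this]
    apply List.filter_congr
    intro u hu
    obtain ⟨huL, hidx⟩ := (pv_mem_after_iff L hN c hc u).mp hu
    rw [Bool.eq_iff_iff, decide_eq_true_iff]
    rw [hmem u huL]
    have hinf_iff : PySem.Str.isIn c u = true ↔ c.toList <:+: u.toList :=
      PySem.Str.isIn_iff_infix c u
    constructor
    · rintro ⟨_, _, _, hinf⟩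
      exact hinf_iff.mpr hinf
    · intro hisin
      have hinf := hinf_iff.mp hisin
      exact ⟨hc, h2, (pv_len_lt_iff L hN hP c u hc huL hinf).mp hidx, hinf⟩
  · rw [if_neg (by tauto)]
    rw [List.filter_eq_nil_iff]
    intro u hu
    simp only [decide_eq_true_eq]
    intro hmem'
    obtain ⟨_, h2, _, _⟩ := (hmem u hu).mp hmem'
    have := PySem.Str.len_eq c
    omega

-- ---------- inner loops ----------
theorem pv_innerA_getD (s : String) : ∀ (rest : List String)
    (d : PySem.Dict String (List String × List String)), s ∉ rest → rest.Nodup →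
    ∀ c, (rest.foldl (pvStepA s) d).getD c pvV0 =
      ((d.getD c pvV0).1 ++ (if c = s then rest.filter (fun u => PySem.Str.isIn s u) else []),
       (d.getD c pvV0).2 ++ (if c ∈ rest ∧ PySem.Str.isIn s c = true then [s] else [])) := by
  intro rest
  induction rest with
  | nil => intro d _ _ c; simp
  | cons u rest ih =>
    intro d hsm hnd c
    have hsu : s ≠ u := by intro h; exact hsm (h ▸ List.mem_cons_self)
    have hsrest : s ∉ rest := fun h => hsm (List.mem_cons_of_mem u h)
    have hurest : u ∉ rest := (List.nodup_cons.mp hnd).1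
    simp only [List.foldl_cons]
    rw [ih _ hsrest (List.nodup_cons.mp hnd).2 c]
    simp only [pvV0, pvStepA]
    by_cases hin : PySem.Str.isIn s u
    · have hin' : PySem.Chars.isIn s.toList u.toList = true := by simpa using hin
      rw [if_pos hin]
      rw [PySem.Dict.getD_modify, PySem.Dict.getD_modify]
      by_cases hcu : c = u
      · subst hcu
        have hcs : ¬ (c = s) := fun h => hsu h.symm
        simp [hcs, hurest, hin, hin', List.filter_cons]
      · by_cases hcs : c = s
        · subst hcs
          simp [hcu, hsrest, hsu, hin, hin', List.filter_cons]
        · simp [hcu, hcs, List.filter_cons, hin, hin', PySem.Dict.getD_modify]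
    · have hin' : PySem.Chars.isIn s.toList u.toList = false := by simpa using hin
      rw [if_neg hin]
      by_cases hcu : c = u
      · subst hcu
        have hfalse : PySem.Str.isIn s c = false := by simpa using hin
        have hcs : ¬ (c = s) := by rintro rfl; exact hsm List.mem_cons_self
        simp [hcs, hurest, hfalse, List.filter_cons, hin, hin']
      · simp [hcu, List.filter_cons, hin, hin']

theorem pv_innerA_keys (s : String) : ∀ (rest : List String)
    (d : PySem.Dict String (List String × List String)), s ∈ d.keys → (∀ u ∈ rest, u ∈ d.keys) →
    (rest.foldl (pvStepA s) d).keys = d.keys := by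
  intro rest
  induction rest with
  | nil => intro d _ _; rfl
  | cons u rest ih =>
    intro d hs hu
    simp only [List.foldl_cons]
    have hstep : (pvStepA s d u).keys = d.keys := by
      unfold pvStepA
      split
      · rw [pv_keys_modify_mem, pv_keys_modify_mem]
        · exact hs
        · rw [pv_keys_modify_mem _ _ _ _ hs]
          exact hu u List.mem_cons_self
      · rfl
    rw [ih (pvStepA s d u) (hstep ▸ hs) (fun v hv => hstep ▸ hu v (List.mem_cons_of_mem u hv)),
      hstep]

theorem pv_innerB_getD (t : String) : ∀ (cs : List String)
    (d : PySem.Dict String (List String × List String)), t ∉ cs → cs.Nodup →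
    ∀ c, (cs.foldl (pvStepB t) d).getD c pvV0 =
      ((d.getD c pvV0).1 ++ (if c ∈ cs then [t] else []),
       (d.getD c pvV0).2 ++ (if c = t then cs else [])) := by
  intro cs
  induction cs with
  | nil => intro d _ _ c; simp
  | cons u rest ih =>
    intro d htm hnd c
    have htu : t ≠ u := by intro h; exact htm (h ▸ List.mem_cons_self)
    have htrest : t ∉ rest := fun h => htm (List.mem_cons_of_mem u h)
    have hurest : u ∉ rest := (List.nodup_cons.mp hnd).1
    simp only [List.foldl_cons]
    rw [ih _ htrest (List.nodup_cons.mp hnd).2 c]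
    simp only [pvV0, pvStepB]
    rw [PySem.Dict.getD_modify, PySem.Dict.getD_modify]
    by_cases hcu : c = u
    · subst hcu
      have hct : ¬ (c = t) := fun h => htu h.symm
      simp [hct, hurest]
    · by_cases hct : c = t
      · subst hct
        simp [hcu, htrest, htu]
      · simp [hcu, hct, PySem.Dict.getD_modify]

theorem pv_innerB_keys (t : String) : ∀ (cs : List String)
    (d : PySem.Dict String (List String × List String)), t ∈ d.keys → (∀ u ∈ cs, u ∈ d.keys) →
    (cs.foldl (pvStepB t) d).keys = d.keys := by
  intro cs
  induction cs with
  | nil => intro d _ _; rfl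
  | cons u rest ih =>
    intro d ht hu
    simp only [List.foldl_cons]
    have hstep : (pvStepB t d u).keys = d.keys := by
      unfold pvStepB
      rw [pv_keys_modify_mem, pv_keys_modify_mem]
      · exact ht
      · rw [pv_keys_modify_mem _ _ _ _ ht]
        exact hu u List.mem_cons_self
    rw [ih (pvStepB t d u) (hstep ▸ ht) (fun v hv => hstep ▸ hu v (List.mem_cons_of_mem u hv)),
      hstep]

-- ---------- A: enumerate/slice fold is the structural pair fold ----------
theorem pv_enumFold_eq_pairFold (full : List String) : ∀ (xs : List String) (off : Nat),
    full.drop off = xs → ∀ d,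
    (PySem.List.enumerate xs (off : Int)).foldl (fun d p =>
      if PySem.Str.len p.2 ≤ 1 then d
      else (PySem.List.slice full (some (p.1 + 1)) none).foldl (fun d longer =>
        if PySem.Str.isIn p.2 longer then
          (d.modify p.2 ([], []) (fun q => (q.1 ++ [longer], q.2))).modify longer ([], [])
            (fun q => (q.1, q.2 ++ [p.2]))
        else d) d) d
    = pvPairFold xs d := by
  intro xs
  induction xs with
  | nil => intro off _ d; simp [PySem.List.enumerate, pvPairFold]
  | cons s rest ih =>
    intro off hdrop d
    rw [PySem.List.enumerate_cons]
    simp only [List.foldl_cons]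
    have hrest : full.drop (off + 1) = rest := by
      have h := List.drop_drop (i := 1) (j := off) (l := full)
      rw [hdrop] at h
      simpa using h.symm
    have hslice : PySem.List.slice full (some ((off : Int) + 1)) none = rest := by
      have h0 : (0:Int) ≤ (off : Int) + 1 := by positivity
      rw [PySem.List.slice_from full h0]
      have : ((off : Int) + 1).toNat = off + 1 := by omega
      rw [this, hrest]
    have hcast : ((off : Int) + 1) = ((off + 1 : Nat) : Int) := by push_cast; ring
    rw [hslice]
    rw [hcast, ih (off + 1) hrest]
    unfold pvPairFold
    congr 1
    split <;> rfl

-- ---------- outer invariants ----------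
theorem pv_pairFold_final (L : List String) (hN : L.Nodup) : ∀ (rest pre : List String)
    (d : PySem.Dict String (List String × List String)), L = pre ++ rest → d.keys = L →
    (∀ c, d.getD c pvV0 = (pvA0 L pre c, pvA1 L pre c)) →
    (pvPairFold rest d).keys = L ∧
      ∀ c, (pvPairFold rest d).getD c pvV0 = (pvA0 L L c, pvA1 L L c) := by
  intro rest
  induction rest with
  | nil =>
    intro pre d hsplit hkeys hval
    rw [List.append_nil] at hsplit
    subst hsplit
    exact ⟨hkeys, hval⟩
  | cons s rest2 ih =>
    intro pre d hsplit hkeys hval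
    have hnd : (pre ++ s :: rest2).Nodup := hsplit ▸ hN
    have hspre : s ∉ pre := by
      intro h
      exact (List.disjoint_of_nodup_append hnd) h List.mem_cons_self
    have hsrest : s ∉ rest2 := by
      have := (List.nodup_append.mp hnd).2.1
      exact (List.nodup_cons.mp this).1
    have hnd2 : rest2.Nodup := by
      have := (List.nodup_append.mp hnd).2.1
      exact (List.nodup_cons.mp this).2
    have hsL : s ∈ L := by rw [hsplit]; simp
    have hsplit' : L = (pre ++ [s]) ++ rest2 := by rw [hsplit]; simp
    have hidx : L.idxOf s = pre.length := by
      rw [hsplit, List.idxOf_append, if_neg hspre, List.idxOf_cons_self]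
      omega
    have hafter : pvAfter L s = rest2 := by
      unfold pvAfter
      rw [hidx, hsplit']
      have : pre.length + 1 = (pre ++ [s]).length := by simp
      rw [this, List.drop_left]
    have hA0' : ∀ c, pvA0 L (pre ++ [s]) c =
        pvA0 L pre c ++ (if c = s ∧ 1 < PySem.Str.len s then
          rest2.filter (fun u => PySem.Str.isIn s u) else []) := by
      intro c
      unfold pvA0
      by_cases hcs : c = s
      · subst hcs
        simp only [if_pos rfl]
        by_cases hlen : 1 < PySem.Str.len c
        · rw [if_pos (show c ∈ pre ++ [c] ∧ 1 < PySem.Str.len c from ⟨by simp, hlen⟩),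
            if_neg (show ¬(c ∈ pre ∧ 1 < PySem.Str.len c) from fun h => hspre h.1), hafter,
            if_pos (show True ∧ 1 < PySem.Str.len c from ⟨trivial, hlen⟩), List.nil_append]
        · rw [if_neg (show ¬(c ∈ pre ++ [c] ∧ 1 < PySem.Str.len c) from fun h => hlen h.2),
            if_neg (show ¬(c ∈ pre ∧ 1 < PySem.Str.len c) from fun h => hlen h.2),
            if_neg (show ¬(True ∧ 1 < PySem.Str.len c) from fun h => hlen h.2)]
          simp
      · have hmemiff : (c ∈ pre ++ [s]) ↔ c ∈ pre := by simp [hcs]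
        rw [if_neg (show ¬(c = s ∧ 1 < PySem.Str.len s) from fun h => hcs h.1)]
        by_cases hc : c ∈ pre ∧ 1 < PySem.Str.len c
        · rw [if_pos (show c ∈ pre ++ [s] ∧ 1 < PySem.Str.len c from ⟨hmemiff.mpr hc.1, hc.2⟩),
            if_pos hc]
          simp
        · rw [if_neg (show ¬(c ∈ pre ++ [s] ∧ 1 < PySem.Str.len c) from
              fun h => hc ⟨hmemiff.mp h.1, h.2⟩), if_neg hc]
          simp
    have hA1' : ∀ c, pvA1 L (pre ++ [s]) c =
        pvA1 L pre c ++ (if c ∈ rest2 ∧ PySem.Str.isIn s c = true ∧ 1 < PySem.Str.len s then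
          [s] else []) := by
      intro c
      unfold pvA1
      rw [List.filter_append]
      congr 1
      simp only [List.filter_cons, List.filter_nil]
      rw [hafter]
      have hsl : s.toList.length = s.length := by simp
      have e := PySem.Str.len_eq s
      by_cases h : c ∈ rest2 ∧ PySem.Str.isIn s c = true ∧ 1 < PySem.Str.len s
      · rw [if_pos h]
        obtain ⟨h1, h2, h3⟩ := h
        have h3' : 1 < s.length := by omega
        have h2' : PySem.Chars.isIn s.toList c.toList = true := by simpa using h2
        simp [h1, h2', h3']
      · rw [if_neg h]
        push_neg at h
        by_cases h1 : c ∈ rest2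
        · by_cases h2 : PySem.Str.isIn s c = true
          · have h3 := h h1 h2
            have h3' : ¬ 1 < s.length := by omega
            simp [h3']
          · have h2f : PySem.Str.isIn s c = false := by
              cases hh : PySem.Str.isIn s c
              · rfl
              · exact absurd hh h2
            have h2' : PySem.Chars.isIn s.toList c.toList = false := by simpa using h2f
            simp [h2']
        · simp [h1]
    unfold pvPairFold
    by_cases hlen : PySem.Str.len s ≤ 1
    · rw [if_pos hlen]
      apply ih (pre ++ [s]) d hsplit' hkeys
      intro c
      rw [hval c, hA0' c, hA1' c]
      rw [if_neg (by intro h; omega), if_neg (by intro h; omega)]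
      simp
    · rw [if_neg hlen]
      have hlen' : 1 < PySem.Str.len s := by omega
      have hkeys' : (rest2.foldl (pvStepA s) d).keys = L := by
        rw [pv_innerA_keys s rest2 d (hkeys ▸ hsL)
          (fun u hu => hkeys ▸ (by rw [hsplit]; simp [hu] : u ∈ L))]
        exact hkeys
      apply ih (pre ++ [s]) _ hsplit' hkeys'
      intro c
      rw [pv_innerA_getD s rest2 d hsrest hnd2 c, hval c, hA0' c, hA1' c]
      rw [Prod.mk.injEq]
      refine ⟨?_, ?_⟩
      · by_cases hcs : c = s
        · rw [if_pos hcs, if_pos ⟨hcs, hlen'⟩]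
        · rw [if_neg hcs, if_neg (by tauto)]
      · by_cases hc : c ∈ rest2 ∧ PySem.Str.isIn s c = true
        · rw [if_pos hc, if_pos ⟨hc.1, hc.2, hlen'⟩]
        · rw [if_neg hc, if_neg (by tauto)]

theorem pv_foldB_final (L : List String) (hN : L.Nodup)
    (hP : L.Pairwise (fun a b => PySem.Str.len a ≤ PySem.Str.len b)) :
    ∀ (rest pre : List String) (d : PySem.Dict String (List String × List String)),
    L = pre ++ rest → d.keys = L →
    (∀ c, d.getD c pvV0 = (pre.filter (fun u => decide (c ∈ pvCs L u)),
                           if c ∈ pre then pvCs L c else [])) →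
    (rest.foldl (fun d t => (pvCs L t).foldl (pvStepB t) d) d).keys = L ∧
      ∀ c, (rest.foldl (fun d t => (pvCs L t).foldl (pvStepB t) d) d).getD c pvV0 =
        (L.filter (fun u => decide (c ∈ pvCs L u)), if c ∈ L then pvCs L c else []) := by
  intro rest
  induction rest with
  | nil =>
    intro pre d hsplit hkeys hval
    rw [List.append_nil] at hsplit
    subst hsplit
    exact ⟨hkeys, hval⟩
  | cons t rest2 ih =>
    intro pre d hsplit hkeys hval
    have hnd : (pre ++ t :: rest2).Nodup := hsplit ▸ hN
    have htpre : t ∉ pre := by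
      intro h
      exact (List.disjoint_of_nodup_append hnd) h List.mem_cons_self
    have htL : t ∈ L := by rw [hsplit]; simp
    have hsplit' : L = (pre ++ [t]) ++ rest2 := by rw [hsplit]; simp
    have hcs_eq := pv_pvCs_eq_pvA1 L hN hP t htL
    have hcs_sub : ∀ u ∈ pvCs L t, u ∈ L := by
      intro u hu
      rw [hcs_eq] at hu
      exact List.mem_of_mem_filter hu
    have hcs_nodup : (pvCs L t).Nodup := by
      rw [hcs_eq]; unfold pvA1; exact hN.filter _
    have htcs : t ∉ pvCs L t := by
      intro h
      have := (pv_mem_pvA1_iff L hN hP t htL t).mp (hcs_eq ▸ h)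
      omega
    simp only [List.foldl_cons]
    apply ih (pre ++ [t]) _ hsplit'
    · rw [pv_innerB_keys t (pvCs L t) d (hkeys ▸ htL) (fun u hu => hkeys ▸ hcs_sub u hu)]
      exact hkeys
    · intro c
      rw [pv_innerB_getD t (pvCs L t) d htcs hcs_nodup c, hval c]
      rw [Prod.mk.injEq]
      refine ⟨?_, ?_⟩
      · rw [List.filter_append]
        congr 1
        simp only [List.filter_cons, List.filter_nil]
        by_cases hc : c ∈ pvCs L t
        · simp [hc]
        · simp [hc]
      · by_cases hct : c = t
        · subst hct
          rw [if_pos (by simp : c ∈ pre ++ [c]), if_neg (fun h => htpre h), if_pos rfl,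
            List.nil_append]
        · rw [if_neg hct]
          by_cases hc : c ∈ pre
          · rw [if_pos (by simp [hc] : c ∈ pre ++ [t]), if_pos hc, List.append_nil]
          · rw [if_neg (by simp [hc, hct] : ¬ c ∈ pre ++ [t]), if_neg hc, List.append_nil]

-- ---------- bridges from the ports ----------
theorem pv_A_eq (tokens : List (String × Int)) :
    find_substring_relationships tokens =
      (pvPairFold (pvOrder tokens) (pvInit (pvOrder tokens))).items := by
  have h := pv_enumFold_eq_pairFold (pvOrder tokens) (pvOrder tokens) 0 rfl
    (pvInit (pvOrder tokens))
  rw [Nat.cast_zero] at h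
  exact congrArg PySem.Dict.items h

theorem pv_B_eq (tokens : List (String × Int)) :
    find_substring_relationships_alt tokens =
      ((pvOrder tokens).foldl (fun d t => (pvCs (pvOrder tokens) t).foldl (pvStepB t) d)
        (pvInit (pvOrder tokens))).items := rfl

theorem pv_order_nodup (tokens : List (String × Int)) : (pvOrder tokens).Nodup := by
  unfold pvOrder
  exact (PySem.List.sorted_perm _ _ _).nodup_iff.mpr
    (PySem.List.nodup_dedup (tokens.map (fun p => p.1)))

theorem pv_order_pairwise (tokens : List (String × Int)) :
    (pvOrder tokens).Pairwise (fun a b => PySem.Str.len a ≤ PySem.Str.len b) := by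
  unfold pvOrder
  exact PySem.List.sorted_pairwise _ _



-- ===== VERDICT (by name: the statement is the Claim_ definition above) =====
theorem find_substring_relationships_spec : Claim_equal_find_substring_relationships := by
  intro tokens _
  unfold Spec_find_substring_relationships
  rw [pv_A_eq, pv_B_eq]
  have hN := pv_order_nodup tokens
  have hP := pv_order_pairwise tokens
  obtain ⟨hkA, hvA⟩ := pv_pairFold_final (pvOrder tokens) hN (pvOrder tokens) [] _ rfl
    (pvInit_keys _ hN) (fun c => by
      rw [pvInit_getD _ hN c]
      simp [pvA0, pvA1, pvV0])
  obtain ⟨hkB, hvB⟩ := pv_foldB_final (pvOrder tokens) hN hP (pvOrder tokens) [] _ rfl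
    (pvInit_keys _ hN) (fun c => by
      rw [pvInit_getD _ hN c]
      simp [pvV0])
  rw [pv_items_eq_keys_map _ (by rw [hkA]; exact hN), pv_items_eq_keys_map _ (by rw [hkB]; exact hN), hkA, hkB]
  apply List.map_congr_left
  intro k hk
  rw [hvA k, hvB k]
  rw [Prod.mk.injEq, Prod.mk.injEq]
  refine ⟨rfl, ?_, ?_⟩
  · exact (pv_filter_pvCs_eq_pvA0 (pvOrder tokens) hN hP k hk).symm
  · rw [if_pos hk]
    exact (pv_pvCs_eq_pvA1 (pvOrder tokens) hN hP k hk).symm
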